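-- pv_equiv track=rewrite | github.com/Kittisak008B/Problem-Solving | LeetCode/Two Pointers/2000. Reverse Prefix of Word.py | reversePrefix
-- ===== SOURCE A (Python) =====
-- def reversePrefix(word: str, ch: str) -> str:
--     word2 = list(word)
--     for i in range(len(word)) :
--         if word2[i] == ch :
--             j = 0
--             while j < i :
--                 word2[i] ,word2[j] = word2[j] ,word2[i]
--                 j += 1
--                 i -= 1
--             break
--     return ''.join(word2)
-- ===== SOURCE B (Python) =====
-- def reversePrefix(word: str, ch: str) -> str:
--     idx = next((i for i, c in enumerate(word) if c == ch), -1)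
--     if idx == -1:
--         return word
--     return word[:idx + 1][::-1] + word[idx + 1:]
-- ===== Notes on version B (the rewrite author's own statement) =====
-- stated objective: simpler
-- what changed: Replaces A's in-place two-pointer swap loop inside a scanning for-loop by a single first-match index scan followed by slice reversal and concatenation of the prefix and suffix.
import Mathlib
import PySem

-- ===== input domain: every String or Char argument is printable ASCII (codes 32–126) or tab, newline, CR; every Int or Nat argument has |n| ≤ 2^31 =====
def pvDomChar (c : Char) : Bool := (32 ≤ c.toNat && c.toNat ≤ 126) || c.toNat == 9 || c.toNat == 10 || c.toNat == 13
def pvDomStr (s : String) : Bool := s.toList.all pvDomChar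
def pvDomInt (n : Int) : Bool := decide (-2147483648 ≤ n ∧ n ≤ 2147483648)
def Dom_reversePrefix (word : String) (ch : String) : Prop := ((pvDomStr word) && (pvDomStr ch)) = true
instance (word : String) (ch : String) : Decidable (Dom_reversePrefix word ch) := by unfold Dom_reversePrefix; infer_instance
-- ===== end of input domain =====

-- B replaces A's two-pointer in-place swap loop inside a scanning for-loop by a
-- first-match index scan followed by slice reversal of the prefix (objective: simpler).

-- ===== PORT A =====
-- the inner 'while j < i' swap loop of A; indices are always in range when called
-- (word2[i] in Python is a 1-char string, so the getD default is never read)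
def pySwapLoop (l : List Char) (j i : Nat) : List Char :=
  if j < i then
    pySwapLoop ((l.set i (l.getD j default)).set j (l.getD i default)) (j + 1) (i - 1)
  else l
termination_by i - j

-- the 'for i in range(len(word))' scan with break
def pyFindLoop (l : List Char) (ch : String) (i n : Nat) : List Char :=
  if i < n then
    if String.ofList [l.getD i default] == ch then pySwapLoop l 0 i
    else pyFindLoop l ch (i + 1) n
  else l
termination_by n - i

def reversePrefix (word : String) (ch : String) : String :=
  String.ofList (pyFindLoop word.toList ch 0 word.toList.length)

-- ===== PORT B =====
-- the generator scan 'next((i for i,c in enumerate(word) if c == ch), -1)'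
def firstMatchIdx (l : List Char) (ch : String) (i : Nat) : Int :=
  match l with
  | [] => -1
  | c :: rest => if String.ofList [c] == ch then (i : Int) else firstMatchIdx rest ch (i + 1)

def reversePrefix_alt (word : String) (ch : String) : String :=
  let idx := firstMatchIdx word.toList ch 0
  if idx == -1 then word
  else
    -- word[:idx+1][::-1] + word[idx+1:]; here 0 ≤ idx, so the slices are take/drop
    String.ofList ((word.toList.take (idx.toNat + 1)).reverse ++ word.toList.drop (idx.toNat + 1))

-- ===== PRECONDITION & SPEC =====
def Spec_reversePrefix (word : String) (ch : String) (out : String) : Prop := out = reversePrefix_alt word ch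
instance (word : String) (ch : String) (out : String) : Decidable (Spec_reversePrefix word ch out) := by unfold Spec_reversePrefix; infer_instance

-- ===== CLAIM (what is proved, stated in full; the proofs are below) =====
def Claim_equal_reversePrefix : Prop := ∀ (word : String) (ch : String), Dom_reversePrefix word ch → Spec_reversePrefix word ch (reversePrefix word ch)

-- ===== LEMMAS AND PROOFS =====

-- A's swap loop, pointwise: positions in [j, i] are mirrored, the rest untouched
lemma pySwapLoop_getElem? (l : List Char) (j i : Nat) :
    j ≤ i + 1 → i < l.length →
    ∀ k, (pySwapLoop l j i)[k]? = if j ≤ k ∧ k ≤ i then l[j + i - k]? else l[k]? := by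
  fun_induction pySwapLoop l j i with
  | case1 l j i h ih =>
    intro hji hi k
    have hj : j < l.length := lt_trans h hi
    have hset : ∀ m, ((l.set i (l.getD j default)).set j (l.getD i default))[m]? =
        if m = j then l[i]? else if m = i then l[j]? else l[m]? := by
      intro m
      rw [List.getElem?_set, List.getElem?_set]
      simp only [List.length_set]
      rw [List.getD_eq_getElem l default hi, List.getD_eq_getElem l default hj]
      split_ifs <;> first
        | rfl
        | omega
        | (rw [List.getElem?_eq_getElem (by omega)])
    rw [ih (by omega) (by simpa using by omega) k, hset k, hset (j + 1 + (i - 1) - k)]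
    split_ifs <;> first | rfl | omega | (congr 1; omega)
  | case2 l j i h =>
    intro hji hi k
    split_ifs with hc <;> first | rfl | omega | (congr 1; omega)

-- started at j = 0, the swap loop is exactly B's reversed prefix ++ suffix
lemma pySwapLoop_reverse (l : List Char) (i : Nat) (hi : i < l.length) :
    pySwapLoop l 0 i = (l.take (i + 1)).reverse ++ l.drop (i + 1) := by
  apply List.ext_getElem?
  intro k
  rw [pySwapLoop_getElem? l 0 i (by omega) hi k]
  have htk : (List.take (i + 1) l).length = i + 1 := by
    simp [List.length_take, Nat.min_eq_left (by omega : i + 1 ≤ l.length)]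
  by_cases hk : k ≤ i
  · rw [List.getElem?_append_left (by simp [List.length_reverse, htk]; omega)]
    rw [List.getElem?_reverse (by simp [htk]; omega)]
    rw [htk]
    rw [List.getElem?_take_of_lt (by omega)]
    rw [if_pos ⟨Nat.zero_le _, hk⟩]
    congr 1
    omega
  · rw [List.getElem?_append_right (by simp [List.length_reverse, htk]; omega)]
    rw [List.getElem?_drop]
    rw [if_neg (by omega)]
    congr 1
    simp [List.length_reverse, htk]
    omega

-- A's outer scan from index i agrees with B's first-match scan on the i-suffix
lemma pyFindLoop_eq (l : List Char) (ch : String) (i : Nat) :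
    i ≤ l.length →
    pyFindLoop l ch i l.length =
      (if firstMatchIdx (l.drop i) ch i == -1 then l
       else (l.take ((firstMatchIdx (l.drop i) ch i).toNat + 1)).reverse ++
            l.drop ((firstMatchIdx (l.drop i) ch i).toNat + 1)) := by
  fun_induction pyFindLoop l ch i l.length with
  | case1 i h hc =>
    intro hle
    rw [List.drop_eq_getElem_cons h]
    have hget : l.getD i default = l[i] := List.getD_eq_getElem l default h
    rw [hget] at hc
    simp only [firstMatchIdx, hc, if_true]
    have hne : ((i : Int) == -1) = false := by simp
    rw [hne]
    rw [if_neg (by simp)]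
    rw [Int.toNat_natCast]
    exact pySwapLoop_reverse l i h
  | case2 i h hc ih =>
    intro hle
    rw [List.drop_eq_getElem_cons h]
    have hget : l.getD i default = l[i] := List.getD_eq_getElem l default h
    rw [hget] at hc
    simp only [firstMatchIdx, hc, Bool.false_eq_true, if_false]
    exact ih (by omega)
  | case3 i h =>
    intro hle
    have : i = l.length := by omega
    subst this
    simp [firstMatchIdx]

-- ===== VERDICT (by name: the statement is the Claim_ definition above) =====
theorem reversePrefix_spec : Claim_equal_reversePrefix := by
  intro word ch _
  unfold Spec_reversePrefix reversePrefix reversePrefix_alt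
  have h := pyFindLoop_eq word.toList ch 0 (Nat.zero_le _)
  simp only [List.drop_zero] at h
  rw [h]
  by_cases hc : firstMatchIdx word.toList ch 0 = -1
  · simp [hc, String.ofList_toList]
  · simp [hc]
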